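-- pv_equiv track=rewrite | github.com/tobi8380/advent-of-code | 2025/day2/part1_solve.py | invalid_in_range
-- ===== SOURCE A (Python) =====
-- def is_invalid(num) -> bool:
--     if len(num) % 2 == 0:
--         invalid = True
--         half = len(num) // 2
--         for i in range(half):
--             if num[i] != num[i + half]:
--                 invalid = False
--                 break
--     else:
--         invalid = False
--     return invalid
--
-- def invalid_in_range(range_) -> int:
--     left = int(range_[0])
--     right = int(range_[1])
--     sum = 0
--     for num in range(left, right + 1):
--         if is_invalid(str(num)):
--             sum += int(num)
--     return sum
-- ===== SOURCE B (Python) =====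
-- def invalid_in_range(range_) -> int:
--     left = int(range_[0])
--     right = int(range_[1])
--     total = 0
--     k = 1
--     while 10 ** (2 * k - 1) <= right:
--         m = 10 ** k + 1
--         h_lo = max(10 ** (k - 1), -(-left // m))
--         h_hi = min(10 ** k - 1, right // m)
--         if h_lo <= h_hi:
--             total += m * (h_lo + h_hi) * (h_hi - h_lo + 1) // 2
--         k += 1
--     return total
-- ===== Notes on version B (the rewrite author's own statement) =====
-- stated objective: alternative
-- what changed: Instead of scanning every number in [left,right] and testing its decimal string for equal halves, B enumerates the half-lengths k and sums the doubled numbers h*(10^k+1) for the valid half values h in closed form (arithmetic series); Pre_ excludes lists of fewer than two elements, on which A raises IndexError.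
import Mathlib
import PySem

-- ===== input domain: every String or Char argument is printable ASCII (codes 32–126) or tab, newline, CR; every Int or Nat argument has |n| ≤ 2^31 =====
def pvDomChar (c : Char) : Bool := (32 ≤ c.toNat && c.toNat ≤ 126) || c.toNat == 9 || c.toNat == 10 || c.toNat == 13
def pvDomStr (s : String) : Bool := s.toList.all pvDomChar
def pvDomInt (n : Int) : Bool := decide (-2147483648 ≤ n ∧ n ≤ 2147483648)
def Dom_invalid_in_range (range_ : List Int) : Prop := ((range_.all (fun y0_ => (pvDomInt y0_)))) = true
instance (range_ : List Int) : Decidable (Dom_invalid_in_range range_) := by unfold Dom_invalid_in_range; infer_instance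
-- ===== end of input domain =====

-- B replaces A's linear scan of [left,right] (testing each number's decimal string for equal
-- halves) by a per-half-length closed-form arithmetic-series sum over the doubled numbers
-- h*(10^k+1). Pre_ excludes lists of fewer than two elements, on which A raises IndexError.


-- ===== PORT A =====
-- Python str indexing is ported on the List Char side (PySem.Int.toChars / PySem.List.pyGetD),
-- exact for str(int). The 'for i in range(half)' loop with break is the recursion below.
def pvIsInvalidLoop (num : List Char) (half : Int) : List Int → Bool
  | [] => true
  | i :: rest =>
    if PySem.List.pyGetD num i ' ' ≠ PySem.List.pyGetD num (i + half) ' ' then false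
    else pvIsInvalidLoop num half rest

def is_invalid (num : List Char) : Bool :=
  if PySem.Int.mod (PySem.List.len num) 2 = 0 then
    pvIsInvalidLoop num (PySem.Int.floordiv (PySem.List.len num) 2)
      (PySem.List.pyRange 0 (PySem.Int.floordiv (PySem.List.len num) 2) 1)
  else false

def invalid_in_range (range_ : List Int) : Int :=
  let left := PySem.List.pyGetD range_ 0 0
  let right := PySem.List.pyGetD range_ 1 0
  (PySem.List.pyRange left (right + 1) 1).foldl
    (fun s num => if is_invalid (PySem.Int.toChars num) then s + num else s) 0

-- ===== PORT B =====
-- Source B's while loop over half-lengths k; runs while 10^(2k-1) <= right, adding the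
-- arithmetic-series total of the doubled numbers h*(10^k+1) that fall inside [left,right].
def pvAltLoop (left right : Int) (k : Nat) (total : Int) : Int :=
  if _h10 : (10:Int) ^ (2 * k - 1) ≤ right then
    let m : Int := 10 ^ k + 1
    let hlo : Int := max ((10:Int) ^ (k - 1)) (-(PySem.Int.floordiv (-left) m))
    let hhi : Int := min ((10:Int) ^ k - 1) (PySem.Int.floordiv right m)
    pvAltLoop left right (k + 1)
      (if hlo ≤ hhi then total + PySem.Int.floordiv (m * (hlo + hhi) * (hhi - hlo + 1)) 2
       else total)
  else total
termination_by (right.toNat + 1) - 10 ^ (2 * k - 1)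
decreasing_by
  have h1 : (10:ℕ) ^ (2 * k - 1) < 10 ^ (2 * (k + 1) - 1) :=
    Nat.pow_lt_pow_right (by norm_num) (by omega)
  have h2 : (10:ℕ) ^ (2 * k - 1) ≤ right.toNat := by
    have : ((10:ℤ) ^ (2 * k - 1)) = ((10 ^ (2 * k - 1) : ℕ) : ℤ) := by push_cast; rfl
    omega
  omega

def invalid_in_range_alt (range_ : List Int) : Int :=
  let left := PySem.List.pyGetD range_ 0 0
  let right := PySem.List.pyGetD range_ 1 0
  pvAltLoop left right 1 0

-- ===== PRECONDITION & SPEC =====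
-- Pre_ excludes lists of fewer than two elements, on which A raises IndexError (range_[0] / range_[1]).
def Pre_invalid_in_range (range_ : List Int) : Prop := 2 ≤ range_.length
instance (range_ : List Int) : Decidable (Pre_invalid_in_range range_) := by unfold Pre_invalid_in_range; infer_instance
def pvWitness_invalid_in_range : List Int := [10, 3000]

def Spec_invalid_in_range (range_ : List Int) (out : Int) : Prop := out = invalid_in_range_alt range_
instance (range_ : List Int) (out : Int) : Decidable (Spec_invalid_in_range range_ out) := by unfold Spec_invalid_in_range; infer_instance

-- ===== CLAIM (what is proved, stated in full; the proofs are below) =====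
def Claim_equal_invalid_in_range : Prop := ∀ (range_ : List Int), Dom_invalid_in_range range_ → Pre_invalid_in_range range_ → Spec_invalid_in_range range_ (invalid_in_range range_)

-- ===== LEMMAS AND PROOFS =====

-- 'n is a doubled number with half-length k' — Bool so it can sit under an if
def pvDub (k : ℕ) (n : ℤ) : Bool :=
  decide (10 ^ (k-1) * (10 ^ k + 1) ≤ n ∧ n ≤ (10 ^ k - 1) * (10 ^ k + 1) ∧ ((10:ℤ) ^ k + 1) ∣ n)

theorem pvDub_prop (k : ℕ) (n : ℤ) :
    pvDub k n = true ↔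
      10 ^ (k-1) * (10 ^ k + 1) ≤ n ∧ n ≤ (10 ^ k - 1) * (10 ^ k + 1) ∧ ((10:ℤ) ^ k + 1) ∣ n := by
  simp [pvDub]

theorem pvDub_iff (k : ℕ) (n : ℤ) :
    pvDub k n = true ↔ ∃ h : ℤ, 10 ^ (k-1) ≤ h ∧ h < 10 ^ k ∧ n = h * (10 ^ k + 1) := by
  have hm : (0:ℤ) < 10 ^ k + 1 := by positivity
  rw [pvDub_prop]
  constructor
  · rintro ⟨h1, h2, d, rfl⟩
    refine ⟨d, ?_, ?_, by ring⟩
    · exact le_of_mul_le_mul_right (by linarith [h1]) hm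
    · nlinarith
  · rintro ⟨h, hh1, hh2, rfl⟩
    refine ⟨by nlinarith, by nlinarith, ⟨h, by ring⟩⟩

theorem pow_le_pow10 {a b : ℕ} (h : a ≤ b) : (10:ℤ)^a ≤ 10^b :=
  pow_le_pow_right₀ (by norm_num) h

theorem pvDub_bounds {k : ℕ} (hk : 1 ≤ k) {n : ℤ} (h : pvDub k n = true) :
    (10:ℤ) ^ (2*k - 1) < n ∧ n < 10 ^ (2*k) := by
  obtain ⟨h1, h2, _⟩ := (pvDub_prop k n).mp h
  have e1 : (10:ℤ) ^ (k-1) * (10 ^ k + 1) = 10 ^ (2*k-1) + 10 ^ (k-1) := by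
    have e : (10:ℤ)^(k-1) * 10^k = 10^(2*k-1) := by rw [← pow_add]; congr 1; omega
    rw [mul_add, mul_one, e]
  have e2 : ((10:ℤ) ^ k - 1) * (10 ^ k + 1) = 10 ^ (2*k) - 1 := by
    have e : (10:ℤ)^k * 10^k = 10^(2*k) := by rw [← pow_add]; congr 1; omega
    nlinarith [e]
  have p1 : (0:ℤ) < 10 ^ (k-1) := by positivity
  constructor <;> [linarith [e1 ▸ h1]; linarith [e2 ▸ h2]]

theorem pvDub_unique {j k : ℕ} (hj : 1 ≤ j) (hk : 1 ≤ k) {n : ℤ}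
    (h1 : pvDub j n = true) (h2 : pvDub k n = true) : j = k := by
  by_contra hne
  rcases Nat.lt_or_ge j k with hlt | hge
  · have b1 := (pvDub_bounds hj h1).2
    have b2 := (pvDub_bounds hk h2).1
    have := pow_le_pow10 (show 2*j ≤ 2*k-1 by omega)
    linarith
  · have hlt : k < j := by omega
    have b1 := (pvDub_bounds hk h2).2
    have b2 := (pvDub_bounds hj h1).1
    have := pow_le_pow10 (show 2*k ≤ 2*j-1 by omega)
    linarith

theorem pvDigitChar_inj {a b : ℕ} (ha : a < 10) (hb : b < 10)
    (h : Nat.digitChar a = Nat.digitChar b) : a = b := by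
  interval_cases a <;> interval_cases b <;> simp_all [Nat.digitChar]

theorem pvDigitChar_ne_dash {a : ℕ} (ha : a < 10) : Nat.digitChar a ≠ '-' := by
  interval_cases a <;> decide

theorem pvToDigitsCore_eq (fuel : ℕ) : ∀ (n : ℕ) (acc : List Char), 0 < n → n < 10 ^ fuel →
    Nat.toDigitsCore 10 fuel n acc = ((Nat.digits 10 n).map Nat.digitChar).reverse ++ acc := by
  induction fuel with
  | zero => intro n acc hn h; omega
  | succ f ih =>
    intro n acc hn h
    rw [Nat.toDigitsCore, Nat.digits_def' (by norm_num : 1 < 10) hn]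
    by_cases hq : n / 10 = 0
    · simp [hq]
    · have hf : 0 < n / 10 := Nat.pos_of_ne_zero hq
      have hlt : n / 10 < 10 ^ f := by
        apply Nat.div_lt_of_lt_mul
        calc n < 10 ^ (f+1) := h
        _ = 10 * 10 ^ f := by ring
      simp only [hq, if_false]
      rw [ih (n/10) _ hf hlt]
      simp

theorem pvToDigits_eq {n : ℕ} (hn : 0 < n) :
    Nat.toDigits 10 n = ((Nat.digits 10 n).map Nat.digitChar).reverse := by
  rw [Nat.toDigits, pvToDigitsCore_eq (n+1) n [] hn ?_, List.append_nil]
  calc n < 10 ^ n := Nat.lt_pow_self (by norm_num)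
  _ ≤ 10 ^ (n+1) := Nat.pow_le_pow_right (by norm_num) (by omega)

theorem pvLoop_iff (num : List Char) (half : Int) (l : List Int) :
    pvIsInvalidLoop num half l = true ↔
      ∀ i ∈ l, PySem.List.pyGetD num i ' ' = PySem.List.pyGetD num (i + half) ' ' := by
  induction l with
  | nil => simp [pvIsInvalidLoop]
  | cons i rest ih =>
    rw [pvIsInvalidLoop]
    split_ifs with h
    · simp only [List.mem_cons]
      constructor
      · intro hf; cases hf
      · intro hall; exact absurd (hall i (Or.inl rfl)) h
    · push Not at h
      simp [ih, h]

theorem pvIsInvalid_iff (cs : List Char) :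
    is_invalid cs = true ↔ cs.length % 2 = 0 ∧
      ∀ j : ℕ, j < cs.length/2 → cs.getD j ' ' = cs.getD (j + cs.length/2) ' ' := by
  have hmod : PySem.Int.mod (PySem.List.len cs) 2 = ((cs.length % 2 : ℕ) : ℤ) := by
    rw [PySem.List.len_eq]; exact_mod_cast PySem.Int.mod_natCast cs.length 2
  have hdiv : PySem.Int.floordiv (PySem.List.len cs) 2 = ((cs.length / 2 : ℕ) : ℤ) := by
    rw [PySem.List.len_eq]; exact_mod_cast PySem.Int.floordiv_natCast cs.length 2
  rw [is_invalid, hmod, hdiv]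
  split_ifs with h
  · have hm2 : cs.length % 2 = 0 := by exact_mod_cast h
    rw [pvLoop_iff]
    simp only [hm2, true_and]
    constructor
    · intro hall j hj
      have := hall (j : ℤ) (by rw [PySem.List.mem_pyRange_one]; constructor <;> omega)
      rw [PySem.List.pyGetD_natCast] at this
      rw [show ((j:ℤ) + ((cs.length/2 : ℕ):ℤ)) = ((j + cs.length/2 : ℕ) : ℤ) by push_cast; ring,
        PySem.List.pyGetD_natCast] at this
      simpa using this
    · intro hall i hi
      rw [PySem.List.mem_pyRange_one] at hi
      obtain ⟨h0, h1⟩ := hi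
      have hj := hall i.toNat (by omega)
      have e1 : (i.toNat : ℤ) = i := by omega
      rw [← e1, PySem.List.pyGetD_natCast,
        show ((i.toNat:ℤ) + ((cs.length/2 : ℕ):ℤ)) = ((i.toNat + cs.length/2 : ℕ) : ℤ) by push_cast; ring,
        PySem.List.pyGetD_natCast]
      simpa using hj
  · simp only [false_iff]
    intro ⟨hm2, _⟩
    exact h (by exact_mod_cast hm2)

theorem pvHalf_iff (cs : List Char) (k : ℕ) (hL : cs.length = 2 * k) :
    (∀ j : ℕ, j < k → cs.getD j ' ' = cs.getD (j + k) ' ') ↔ cs = cs.take k ++ cs.take k := by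
  have htk : (cs.take k).length = k := by rw [List.length_take]; omega
  constructor
  · intro hall
    apply List.ext_getElem
    · simp [htk]; omega
    · intro j hj hj2
      rw [List.length_append, htk] at hj2
      by_cases hjk : j < k
      · rw [List.getElem_append_left (by omega)]
        simp [List.getElem_take]
      · rw [List.getElem_append_right (by omega)]
        have h0 := hall (j - k) (by omega)
        rw [List.getD_eq_getElem cs ' ' (by omega), List.getD_eq_getElem cs ' ' (by omega)] at h0
        simp only [htk, List.getElem_take]
        have e : j - k + k = j := by omega
        simp only [e] at h0
        exact h0.symm
  · intro he j hj
    have h1 : cs.getD j ' ' = (cs.take k ++ cs.take k).getD j ' ' := by rw [← he]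
    have h2 : cs.getD (j + k) ' ' = (cs.take k ++ cs.take k).getD (j + k) ' ' := by rw [← he]
    rw [h1, h2, List.getD_append _ _ _ _ (by omega),
        List.getD_append_right _ _ _ _ (by omega), htk]
    congr 1
    omega

theorem pvInv_pos (m : ℕ) (hm : 0 < m) :
    is_invalid (((Nat.digits 10 m).map Nat.digitChar).reverse) = true ↔
      ∃ k, 1 ≤ k ∧ ∃ h : ℕ, 10^(k-1) ≤ h ∧ h < 10^k ∧ m = h * (10^k + 1) := by
  set ds := Nat.digits 10 m with hds
  set cs := (ds.map Nat.digitChar).reverse with hcs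
  have hlen : cs.length = ds.length := by simp [hcs]
  have hdsne : ds ≠ [] := by
    rw [hds]; exact Nat.digits_ne_nil_iff_ne_zero.mpr (by omega)
  have hlt10 : ∀ x ∈ ds, x < 10 := fun x hx => Nat.digits_lt_base (by norm_num) (hds ▸ hx)
  rw [pvIsInvalid_iff]
  constructor
  · rintro ⟨heven, hhalf⟩
    set k := cs.length / 2 with hk
    have hL : cs.length = 2 * k := by omega
    have hk1 : 1 ≤ k := by
      have : ds.length ≠ 0 := fun h => hdsne (List.eq_nil_of_length_eq_zero h)
      omega
    have hcseq : cs = cs.take k ++ cs.take k := (pvHalf_iff cs k hL).mp hhalf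
    -- turn into ds = d1 ++ d1
    have hmap : ds.map Nat.digitChar = (cs.take k).reverse ++ (cs.take k).reverse := by
      have : ds.map Nat.digitChar = cs.reverse := by rw [hcs, List.reverse_reverse]
      rw [this]
      conv_lhs => rw [hcseq]
      rw [List.reverse_append]
    have htk : (cs.take k).length = k := by rw [List.length_take]; omega
    set d1 := ds.take k with hd1
    set d2 := ds.drop k with hd2
    have hds12 : ds = d1 ++ d2 := (List.take_append_drop k ds).symm
    have hld1 : d1.length = k := by rw [hd1, List.length_take]; omega
    have hld2 : d2.length = k := by rw [hd2, List.length_drop]; omega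
    have hmap1 : d1.map Nat.digitChar = (cs.take k).reverse := by
      have := hmap
      conv_lhs at this => rw [hds12]
      rw [List.map_append] at this
      exact List.append_inj_left this (by simp [hld1, htk])
    have hmap2 : d2.map Nat.digitChar = (cs.take k).reverse := by
      have := hmap
      conv_lhs at this => rw [hds12]
      rw [List.map_append] at this
      exact List.append_inj_right this (by simp [hld1, htk])
    have hd12 : d1 = d2 := by
      apply List.ext_getElem (by omega)
      intro j hj hj2
      have : (d1.map Nat.digitChar)[j]'(by simpa using hj) = (d2.map Nat.digitChar)[j]'(by simpa using hj2) := by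
        simp only [hmap1, hmap2]
      simp only [List.getElem_map] at this
      exact pvDigitChar_inj (hlt10 _ (hds12 ▸ List.mem_append_left d2 (List.getElem_mem hj)))
        (hlt10 _ (hds12 ▸ List.mem_append_right d1 (List.getElem_mem hj2))) this
    have hdsdd : ds = d1 ++ d1 := by rw [hds12, hd12]
    have hd1ne : d1 ≠ [] := by
      intro h; rw [h] at hld1; simp at hld1; omega
    have hlast : d1.getLast hd1ne ≠ 0 := by
      have hg := Nat.getLast_digit_ne_zero 10 (show m ≠ 0 by omega)
      have hg' : ds.getLast hdsne ≠ 0 := hg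
      have e1 : ds.getLast? = d1.getLast? := by
        rw [hdsdd]; exact List.getLast?_append_of_ne_nil _ hd1ne
      rw [List.getLast?_eq_some_getLast hdsne, List.getLast?_eq_some_getLast hd1ne] at e1
      exact (Option.some.inj e1) ▸ hg'
    set h := Nat.ofDigits 10 d1 with hh
    have hdigh : Nat.digits 10 h = d1 :=
      Nat.digits_ofDigits 10 (by norm_num) d1
        (fun l hl => hlt10 l (hdsdd ▸ List.mem_append_left d1 hl)) (fun _ => hlast)
    have hne0 : h ≠ 0 := by
      intro h0
      rw [h0] at hdigh
      simp at hdigh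
      exact hd1ne hdigh
    refine ⟨k, hk1, h, ?_, ?_, ?_⟩
    · have hlog : Nat.log 10 h + 1 = k := by
        have := Nat.length_digits 10 h (by norm_num) hne0
        rw [hdigh, hld1] at this
        omega
      calc 10 ^ (k-1) = 10 ^ Nat.log 10 h := by rw [show k - 1 = Nat.log 10 h by omega]
      _ ≤ h := Nat.pow_log_le_self 10 hne0
    · have : h < 10 ^ (Nat.digits 10 h).length := Nat.lt_base_pow_length_digits (by norm_num)
      rwa [hdigh, hld1] at this
    · have h1 : Nat.ofDigits 10 ds = m := Nat.ofDigits_digits 10 m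
      rw [hdsdd, Nat.ofDigits_append, hdigh.symm] at h1
      rw [Nat.ofDigits_digits 10 h] at h1
      rw [hdigh, hld1] at h1
      rw [← h1]; ring
  · rintro ⟨k, hk1, h, hlo, hhi, rfl⟩
    have hne0 : h ≠ 0 := by
      have : 0 < 10 ^ (k-1) := by positivity
      omega
    have hlenh : (Nat.digits 10 h).length = k := by
      rw [Nat.length_digits 10 h (by norm_num) hne0,
        Nat.log_eq_of_pow_le_of_lt_pow hlo (by rw [Nat.sub_add_cancel hk1]; exact hhi)]
      omega
    have hdsdd : ds = Nat.digits 10 h ++ Nat.digits 10 h := by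
      rw [hds, Nat.digits_append_digits (by norm_num : 0 < 10), hlenh]
      congr 1
      ring
    set u := ((Nat.digits 10 h).map Nat.digitChar).reverse with hu
    have hcsu : cs = u ++ u := by
      rw [hcs, hdsdd, List.map_append, List.reverse_append]
    have hul : u.length = k := by simp [hu, hlenh]
    have hLL : cs.length = 2 * k := by rw [hcsu, List.length_append, hul]; omega
    refine ⟨by omega, ?_⟩
    have hk2 : cs.length / 2 = k := by omega
    rw [hk2]
    apply (pvHalf_iff cs k hLL).mpr
    rw [hcsu, List.take_left' hul]

theorem pvChar (n : ℤ) :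
    is_invalid (PySem.Int.toChars n) = true ↔ ∃ k : ℕ, 1 ≤ k ∧ pvDub k n := by
  have hpos : ∀ k : ℕ, 1 ≤ k → pvDub k n = true → 0 < n := by
    intro k hk hd
    obtain ⟨h1, _, _⟩ := (pvDub_prop k n).mp hd
    have : (0:ℤ) < 10 ^ (k-1) * (10 ^ k + 1) := by positivity
    omega
  rcases lt_trichotomy n 0 with hn | hn | hn
  · -- negative: leading '-' never matches a digit char
    have htne : 0 < n.natAbs := by omega
    have ht : PySem.Int.toChars n
        = '-' :: ((Nat.digits 10 n.natAbs).map Nat.digitChar).reverse := by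
      simp [PySem.Int.toChars, hn]
      exact pvToDigits_eq htne
    constructor
    · intro hinv
      exfalso
      rw [ht, pvIsInvalid_iff] at hinv
      obtain ⟨heven, hhalf⟩ := hinv
      set t := ((Nat.digits 10 n.natAbs).map Nat.digitChar).reverse with hts
      have htlen : 0 < t.length := by
        rw [hts, List.length_reverse, List.length_map]
        exact List.length_pos_of_ne_nil (Nat.digits_ne_nil_iff_ne_zero.mpr (by omega))
      have hL : ('-' :: t).length = t.length + 1 := by simp
      rw [hL] at heven hhalf
      have hhalfpos : 1 ≤ (t.length + 1) / 2 ∧ (t.length + 1) / 2 ≤ t.length := by omega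
      have h0 := hhalf 0 (by omega)
      simp only [List.getD_cons_zero, Nat.zero_add] at h0
      have hget : ('-' :: t).getD ((t.length + 1)/2) ' ' = t.getD ((t.length + 1)/2 - 1) ' ' := by
        rcases Nat.exists_eq_add_of_le hhalfpos.1 with ⟨j, hj⟩
        rw [hj]
        simp [Nat.add_comm]
      rw [hget] at h0
      have hmem : t.getD ((t.length + 1)/2 - 1) ' ' ∈ t := by
        rw [List.getD_eq_getElem t ' ' (by omega)]
        exact List.getElem_mem _
      rw [List.mem_reverse, List.mem_map] at hmem
      obtain ⟨d, hd, hdc⟩ := hmem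
      exact pvDigitChar_ne_dash (Nat.digits_lt_base (by norm_num) hd) (by rw [hdc, ← h0])
    · rintro ⟨k, hk, hdub⟩
      exact absurd (hpos k hk hdub) (by omega)
  · subst hn
    constructor
    · intro h
      exact absurd h (by decide)
    · rintro ⟨k, hk, hdub⟩
      exact absurd (hpos k hk hdub) (by omega)
  · have hm : 0 < n.toNat := by omega
    have ht : PySem.Int.toChars n = ((Nat.digits 10 n.toNat).map Nat.digitChar).reverse := by
      simp [PySem.Int.toChars, not_lt.mpr (le_of_lt hn)]
      exact pvToDigits_eq hm
    rw [ht, pvInv_pos n.toNat hm]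
    constructor
    · rintro ⟨k, hk, h, h1, h2, h3⟩
      refine ⟨k, hk, (pvDub_iff k n).mpr ⟨(h:ℤ), by exact_mod_cast h1, by exact_mod_cast h2, ?_⟩⟩
      have : n = (n.toNat : ℤ) := by omega
      rw [this, h3]
      push_cast
      ring
    · rintro ⟨k, hk, hdub⟩
      obtain ⟨h, h1, h2, h3⟩ := (pvDub_iff k n).mp hdub
      have hh0 : 0 ≤ h := le_trans (by positivity) h1
      refine ⟨k, hk, h.toNat, ?_, ?_, ?_⟩
      · exact_mod_cast (show ((10:ℤ)^(k-1) : ℤ) ≤ (h.toNat : ℤ) by omega)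
      · exact_mod_cast (show ((h.toNat : ℤ)) < (10:ℤ)^k by omega)
      · have e1 : (h.toNat : ℤ) = h := by omega
        have e2 : ((n.toNat : ℤ)) = n := by omega
        have : (n.toNat : ℤ) = (h.toNat : ℤ) * ((10:ℤ)^k + 1) := by rw [e1, e2, h3]
        exact_mod_cast this

theorem pvFoldl_ite (p : ℤ → Bool) (l : List ℤ) (s0 : ℤ) :
    l.foldl (fun s n => if p n then s + n else s) s0
      = s0 + (l.map fun n => if p n then n else 0).sum := by
  induction l generalizing s0 with
  | nil => simp
  | cons x xs ih =>
    simp only [List.foldl_cons, List.map_cons, List.sum_cons, ih]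
    split_ifs <;> ring

theorem pvRange_sum (f : ℤ → ℤ) : ∀ (c : ℕ) (a b : ℤ), (b - a).toNat = c →
    ((PySem.List.pyRange a b 1).map f).sum = ∑ n ∈ Finset.Ico a b, f n := by
  intro c
  induction c with
  | zero =>
    intro a b hc
    have hba : b ≤ a := by omega
    rw [Finset.Ico_eq_empty (by simpa using not_lt.mpr hba)]
    simp [PySem.List.pyRange, not_lt.mpr hba]
  | succ c ih =>
    intro a b hc
    have hab : a < b := by omega
    rw [PySem.List.pyRange_one_cons hab, List.map_cons, List.sum_cons,
        ih (a+1) b (by omega)]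
    have hins : Finset.Ico a b = insert a (Finset.Ico (a+1) b) := by
      ext n; simp only [Finset.mem_Ico, Finset.mem_insert]; omega
    rw [hins, Finset.sum_insert (by simp)]

theorem iccSucc (a b : ℤ) (h : a ≤ b + 1) : Finset.Icc a (b+1) = insert (b+1) (Finset.Icc a b) := by
  ext n; simp [Finset.mem_Icc, Finset.mem_insert]; omega

theorem gaussInt (a : ℤ) : ∀ n : ℕ, 2 * (∑ h ∈ Finset.Icc a (a + n), h) = (2*a+n)*(n+1) := by
  intro n
  induction n with
  | zero => simp
  | succ n ih =>
    have e : (a + ((n:ℤ)+1)) = (a + n) + 1 := by ring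
    push_cast
    rw [e, iccSucc a (a+n) (by omega), Finset.sum_insert (by simp), mul_add, ih]
    ring

theorem gaussInt' {a b : ℤ} (h : a ≤ b) : 2 * (∑ h ∈ Finset.Icc a b, h) = (a+b)*(b-a+1) := by
  have hg := gaussInt a (b - a).toNat
  have hb : a + ((b-a).toNat : ℤ) = b := by omega
  rw [hb] at hg
  have hc : ((b-a).toNat : ℤ) = b - a := by omega
  rw [hc] at hg
  rw [hg]; ring

theorem pvBody_eq (left right : ℤ) (k : ℕ) (_hk : 1 ≤ k) :
    (let m : Int := 10 ^ k + 1
     let hlo : Int := max ((10:Int) ^ (k - 1)) (-(PySem.Int.floordiv (-left) m))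
     let hhi : Int := min ((10:Int) ^ k - 1) (PySem.Int.floordiv right m)
     if hlo ≤ hhi then PySem.Int.floordiv (m * (hlo + hhi) * (hhi - hlo + 1)) 2 else 0)
      = ∑ n ∈ Finset.Ico left (right + 1), if pvDub k n then n else 0 := by
  have hm : (0:ℤ) < 10 ^ k + 1 := by positivity
  set m : ℤ := 10 ^ k + 1 with hmdef
  set hlo : ℤ := max ((10:Int) ^ (k - 1)) (-(PySem.Int.floordiv (-left) m)) with hlodef
  set hhi : ℤ := min ((10:Int) ^ k - 1) (PySem.Int.floordiv right m) with hhidef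
  have hbr : ∀ h : ℤ, (hlo ≤ h ∧ h ≤ hhi) ↔
      (10^(k-1) ≤ h ∧ h < 10^k ∧ left ≤ h*m ∧ h*m ≤ right) := by
    intro h
    have hA : (-(PySem.Int.floordiv (-left) m) ≤ h) ↔ left ≤ h * m := by
      rw [neg_le, PySem.Int.le_floordiv_iff_mul_le hm]
      constructor <;> intro hx <;> nlinarith
    have hB : (h ≤ PySem.Int.floordiv right m) ↔ h * m ≤ right := by
      rw [← not_lt, PySem.Int.floordiv_lt_iff_lt_mul hm, not_lt]
    rw [hlodef, hhidef, max_le_iff, le_min_iff, hA, hB]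
    constructor
    · rintro ⟨⟨a, b⟩, c, d⟩; exact ⟨a, by omega, b, d⟩
    · rintro ⟨a, b, c, d⟩; exact ⟨⟨a, c⟩, by omega, d⟩
  have hset : (Finset.Ico left (right+1)).filter (fun n => pvDub k n = true)
      = (Finset.Icc hlo hhi).image (fun h => h * m) := by
    ext n
    simp only [Finset.mem_filter, Finset.mem_Ico, Finset.mem_image, Finset.mem_Icc]
    constructor
    · rintro ⟨⟨hl, hr⟩, hd⟩
      obtain ⟨h, h1, h2, hn⟩ := (pvDub_iff k _).mp hd
      have hnm : n = h * m := by rw [hn, hmdef]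
      exact ⟨h, (hbr h).mpr ⟨h1, h2, hnm ▸ hl, hnm ▸ (by omega : n ≤ right)⟩, hnm.symm⟩
    · rintro ⟨h, hh, rfl⟩
      obtain ⟨h1, h2, h3, h4⟩ := (hbr h).mp hh
      exact ⟨⟨h3, by omega⟩, (pvDub_iff k _).mpr ⟨h, h1, h2, by rw [hmdef]⟩⟩
  have hsum : (∑ n ∈ Finset.Ico left (right + 1), if pvDub k n then n else 0)
      = ∑ h ∈ Finset.Icc hlo hhi, h * m := by
    rw [← Finset.sum_filter, hset,
      Finset.sum_image (fun x _ y _ hxy => mul_right_cancel₀ (ne_of_gt hm) hxy)]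
  rw [hsum]
  by_cases hle : hlo ≤ hhi
  · rw [if_pos hle]
    have hg := gaussInt' hle
    have he : m * (hlo + hhi) * (hhi - hlo + 1) = 2 * (m * ∑ h ∈ Finset.Icc hlo hhi, h) := by
      calc m * (hlo + hhi) * (hhi - hlo + 1) = m * ((hlo + hhi) * (hhi - hlo + 1)) := by ring
      _ = m * (2 * ∑ h ∈ Finset.Icc hlo hhi, h) := by rw [← hg]
      _ = 2 * (m * ∑ h ∈ Finset.Icc hlo hhi, h) := by ring
    rw [he, PySem.Int.floordiv_eq_ediv_of_pos (by norm_num : (0:ℤ) < 2),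
      Int.mul_ediv_cancel_left _ (by norm_num), ← Finset.sum_mul, mul_comm]
  · rw [if_neg hle, Finset.Icc_eq_empty hle, Finset.sum_empty]

theorem pvAltLoop_eq (left right : ℤ) (K : ℕ) (hK : right < (10:ℤ)^(2*K-1)) :
    ∀ (d k : ℕ) (t : ℤ), K - k = d → 1 ≤ k → k ≤ K →
    pvAltLoop left right k t
      = t + ∑ j ∈ Finset.Ico k K, ∑ n ∈ Finset.Ico left (right + 1), if pvDub j n then n else 0 := by
  intro d
  induction d with
  | zero =>
    intro k t hd hk1 hkK
    have hkeq : k = K := by omega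
    have hcond : ¬ ((10:ℤ) ^ (2*k-1) ≤ right) := by
      subst hkeq; exact not_le.mpr hK
    rw [pvAltLoop, dif_neg hcond, hkeq, Finset.Ico_self, Finset.sum_empty, add_zero]
  | succ d ih =>
    intro k t hd hk1 hkK'
    have hklt : k < K := by omega
    by_cases hcond : (10:ℤ) ^ (2*k-1) ≤ right
    · rw [pvAltLoop, dif_pos hcond, ih (k+1) _ (by omega) (by omega) (by omega)]
      have hsplit : Finset.Ico k K = insert k (Finset.Ico (k+1) K) := by
        ext j; simp only [Finset.mem_Ico, Finset.mem_insert]; omega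
      rw [hsplit, Finset.sum_insert (by simp)]
      rw [← pvBody_eq left right k hk1]
      simp only []
      split_ifs <;> ring
    · rw [pvAltLoop, dif_neg hcond]
      have hz : ∀ j ∈ Finset.Ico k K,
          (∑ n ∈ Finset.Ico left (right+1), if pvDub j n then n else 0) = 0 := by
        intro j hj
        simp only [Finset.mem_Ico] at hj
        apply Finset.sum_eq_zero
        intro n hn
        simp only [Finset.mem_Ico] at hn
        by_cases hd2 : pvDub j n = true
        · exfalso
          have hb := (pvDub_bounds (by omega) hd2).1
          have hmono := pow_le_pow10 (show 2*k-1 ≤ 2*j-1 by omega)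
          have : right < (10:ℤ)^(2*k-1) := not_le.mp hcond
          linarith
        · simp [hd2]
      rw [Finset.sum_congr rfl hz, Finset.sum_const, smul_zero, add_zero]

theorem pvMain (left right : ℤ) :
    (PySem.List.pyRange left (right + 1) 1).foldl
      (fun s num => if is_invalid (PySem.Int.toChars num) then s + num else s) 0
      = pvAltLoop left right 1 0 := by
  set K : ℕ := right.toNat + 1 with hKdef
  have hK : right < (10:ℤ)^(2*K-1) := by
    have h1 : right.toNat < 10 ^ right.toNat := Nat.lt_pow_self (by norm_num)
    have h2 : (10:ℕ) ^ right.toNat ≤ 10 ^ (2*K-1) := Nat.pow_le_pow_right (by norm_num) (by omega)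
    have h3 : ((10:ℤ))^(2*K-1) = ((10^(2*K-1) : ℕ) : ℤ) := by push_cast; rfl
    omega
  rw [pvFoldl_ite, pvRange_sum _ ((right + 1) - left).toNat left (right+1) rfl,
      pvAltLoop_eq left right K hK (K - 1) 1 0 rfl (by omega) (by omega), zero_add, zero_add]
  rw [Finset.sum_comm]
  apply Finset.sum_congr rfl
  intro n hn
  simp only [Finset.mem_Ico] at hn
  by_cases hinv : is_invalid (PySem.Int.toChars n) = true
  · obtain ⟨k, hk1, hdub⟩ := (pvChar n).mp hinv
    have hkK : k < K := by
      by_contra hge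
      have hb := (pvDub_bounds hk1 hdub).1
      have hmono := pow_le_pow10 (show 2*K-1 ≤ 2*k-1 by omega)
      omega
    rw [if_pos hinv, Finset.sum_eq_single_of_mem k (by simp only [Finset.mem_Ico]; omega)]
    · rw [if_pos hdub]
    · intro j hj hne
      simp only [Finset.mem_Ico] at hj
      rw [if_neg]
      intro hdj
      exact hne (pvDub_unique (by omega) hk1 hdj hdub)
  · rw [if_neg hinv]
    symm
    apply Finset.sum_eq_zero
    intro j hj
    simp only [Finset.mem_Ico] at hj
    by_cases hdj : pvDub j n = true
    · exact absurd ((pvChar n).mpr ⟨j, by omega, hdj⟩) hinv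
    · simp [hdj]

-- ===== VERDICT =====
theorem invalid_in_range_spec : Claim_equal_invalid_in_range := by
  intro range_ hdom hpre
  exact pvMain (PySem.List.pyGetD range_ 0 0) (PySem.List.pyGetD range_ 1 0)
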